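-- pv_equiv track=rewrite | github.com/evanprice-dsa/code | trade.py | assign_quartiles_by_index
-- ===== SOURCE A (Python) =====
-- def assign_quartiles_by_index(data):
--     n = len(data)
--
--     # determine the size of each quartile and the remainder
--     base_size = n // 4
--     remainder = n % 4
--
--     # list to hold the quartile sizes
--     quartile_sizes = [base_size + (1 if i < remainder else 0) for i in range(4)]
--
--     # function to determine the quartile based on index
--     def get_quartile(index):
--         accumulated_size = 0
--         for i, size in enumerate(quartile_sizes):
--             accumulated_size += size
--             if index < accumulated_size:
--                 return i + 1
--
--     # assign quartile values based on index and return list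
--     return [get_quartile(i) for i in range(n)]
-- ===== SOURCE B (Python) =====
-- def assign_quartiles_by_index(data):
--     n = len(data)
--     base, rem = divmod(n, 4)
--     result = []
--     for i in range(4):
--         size = base + (1 if i < rem else 0)
--         result += [i + 1] * size
--     return result
-- ===== Notes on version B (the rewrite author's own statement) =====
-- stated objective: simpler
-- what changed: Instead of a per-index linear scan over the cumulative quartile sizes, B emits each quartile's segment directly ([i+1]*size for i in 0..3), building the result in one pass over the four quartiles.
import Mathlib
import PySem

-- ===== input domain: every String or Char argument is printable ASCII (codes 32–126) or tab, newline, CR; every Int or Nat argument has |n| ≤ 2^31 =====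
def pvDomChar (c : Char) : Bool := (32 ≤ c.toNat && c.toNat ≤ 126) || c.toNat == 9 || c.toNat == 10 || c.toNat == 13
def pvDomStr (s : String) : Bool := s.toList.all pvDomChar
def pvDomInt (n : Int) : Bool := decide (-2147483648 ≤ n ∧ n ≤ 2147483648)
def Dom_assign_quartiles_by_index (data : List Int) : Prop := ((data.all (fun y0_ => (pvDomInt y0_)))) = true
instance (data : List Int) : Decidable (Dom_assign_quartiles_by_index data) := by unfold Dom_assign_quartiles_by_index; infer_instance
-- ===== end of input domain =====

-- B replaces A's per-index scan over cumulative quartile sizes with direct segment emission ([i+1]*size per quartile); equal return values on all inputs.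


-- ===== PORT A =====
-- the inner 'for i, size in enumerate(quartile_sizes): acc += size; if index < acc: return i+1'
def pvGqLoop (index : Nat) : List (Int × Nat) → Nat → Option Int
  | [], _ => none
  | (i, size) :: rest, acc =>
    let acc' := acc + size
    if index < acc' then some (i + 1) else pvGqLoop index rest acc'

def assign_quartiles_by_index (data : List Int) : List Int :=
  let n := data.length
  let base_size := n / 4
  let remainder := n % 4
  let quartile_sizes := (List.range 4).map (fun i => base_size + (if i < remainder then 1 else 0))
  let get_quartile := fun (index : Nat) => pvGqLoop index (PySem.List.enumerate quartile_sizes 0) 0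
  -- get_quartile always returns on indices < n; '.getD 0' only covers the unreachable fall-through
  (List.range n).map (fun i => (get_quartile i).getD 0)

-- ===== PORT B =====
def assign_quartiles_by_index_alt (data : List Int) : List Int :=
  let n := data.length
  let base := n / 4
  let rem := n % 4
  (List.range 4).foldl
    (fun result i => result ++ List.replicate (base + (if i < rem then 1 else 0)) ((i : Int) + 1)) []

-- ===== PRECONDITION & SPEC =====
def Spec_assign_quartiles_by_index (data : List Int) (out : List Int) : Prop := out = assign_quartiles_by_index_alt data
instance (data : List Int) (out : List Int) : Decidable (Spec_assign_quartiles_by_index data out) := by unfold Spec_assign_quartiles_by_index; infer_instance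

-- ===== CLAIM (what is proved, stated in full; the proofs are below) =====
def Claim_equal_assign_quartiles_by_index : Prop := ∀ (data : List Int), Dom_assign_quartiles_by_index data → Spec_assign_quartiles_by_index data (assign_quartiles_by_index data)

-- ===== LEMMAS AND PROOFS =====

-- generic core: a range-map of the 4-step nested-if selector equals the four concatenated segments
lemma pv_key (q0 q1 q2 q3 : Nat) :
    (List.range (q0 + q1 + q2 + q3)).map
      (fun j => if j < q0 then (1 : Int) else if j < q0 + q1 then 2 else
                if j < q0 + q1 + q2 then 3 else if j < q0 + q1 + q2 + q3 then 4 else 0)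
    = List.replicate q0 (1 : Int) ++ List.replicate q1 2 ++ List.replicate q2 3 ++ List.replicate q3 4 := by
  apply List.ext_getElem
  · simp; omega
  · intro j h1 h2
    simp only [List.getElem_map, List.getElem_range]
    have hj : j < q0 + q1 + q2 + q3 := by simpa using h1
    rcases Nat.lt_or_ge j q0 with h | h
    · rw [List.getElem_append_left, List.getElem_append_left, List.getElem_append_left] <;>
        simp [h] <;> omega
    · rcases Nat.lt_or_ge j (q0 + q1) with h' | h'
      · rw [List.getElem_append_left, List.getElem_append_left, List.getElem_append_right] <;>
          simp [*] <;> omega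
      · rcases Nat.lt_or_ge j (q0 + q1 + q2) with h'' | h''
        · rw [List.getElem_append_left, List.getElem_append_right] <;> simp [*] <;> omega
        · rw [List.getElem_append_right]
          · simp only [List.getElem_replicate]
            split_ifs <;> omega
          · simp; omega

-- ===== VERDICT (by name: the statement is the Claim_ definition above) =====
theorem assign_quartiles_by_index_spec : Claim_equal_assign_quartiles_by_index := by
  intro data _
  unfold Spec_assign_quartiles_by_index assign_quartiles_by_index assign_quartiles_by_index_alt
  set n := data.length with hn
  have hr4 : List.range 4 = [0, 1, 2, 3] := by decide
  simp only [hr4, List.map_cons, List.map_nil, List.foldl_cons, List.foldl_nil,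
    PySem.List.enumerate_cons, PySem.List.enumerate_nil, List.nil_append]
  set q0 := n / 4 + (if 0 < n % 4 then 1 else 0) with hq0
  set q1 := n / 4 + (if 1 < n % 4 then 1 else 0) with hq1
  set q2 := n / 4 + (if 2 < n % 4 then 1 else 0) with hq2
  set q3 := n / 4 + (if 3 < n % 4 then 1 else 0) with hq3
  have hsum : n = q0 + q1 + q2 + q3 := by
    simp only [hq0, hq1, hq2, hq3]; split_ifs <;> omega
  rw [hsum]
  norm_num
  simp only [← List.append_assoc]
  rw [← pv_key q0 q1 q2 q3]
  apply List.map_congr_left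
  intro j hj
  simp only [List.mem_range] at hj
  simp only [pvGqLoop, Nat.zero_add]
  norm_num
  split_ifs <;> rfl
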